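-- pv_equiv track=rewrite | github.com/Tomi747/HaziFeladat | hazi3.py | feladat_10
-- ===== SOURCE A (Python) =====
-- def feladat_10(a,b):
--     db=0
--     if a<b:
--         for i in range (a,b+1):
--             if i%4==0 and i%100!=0:
--                 db+=1
--             elif i%400==0:
--                 db+=1
--     else:
--         for i in range (b,a+1):
--             if i%4==0 and i%100!=0:
--                 db+=1
--             elif i%400==0:
--                 db+=1
--     return db
-- ===== SOURCE B (Python) =====
-- def feladat_10(a, b):
--     lo, hi = (a, b) if a < b else (b, a)
--
--     def F(n):
--         return n // 4 - n // 100 + n // 400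
--
--     return F(hi) - F(lo - 1)
-- ===== Notes on version B (the rewrite author's own statement) =====
-- stated objective: faster
-- what changed: Replaced the year-by-year loop with a closed-form count using the floor-division prefix function F(n)=n//4-n//100+n//400, answering F(hi)-F(lo-1).
import Mathlib
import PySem

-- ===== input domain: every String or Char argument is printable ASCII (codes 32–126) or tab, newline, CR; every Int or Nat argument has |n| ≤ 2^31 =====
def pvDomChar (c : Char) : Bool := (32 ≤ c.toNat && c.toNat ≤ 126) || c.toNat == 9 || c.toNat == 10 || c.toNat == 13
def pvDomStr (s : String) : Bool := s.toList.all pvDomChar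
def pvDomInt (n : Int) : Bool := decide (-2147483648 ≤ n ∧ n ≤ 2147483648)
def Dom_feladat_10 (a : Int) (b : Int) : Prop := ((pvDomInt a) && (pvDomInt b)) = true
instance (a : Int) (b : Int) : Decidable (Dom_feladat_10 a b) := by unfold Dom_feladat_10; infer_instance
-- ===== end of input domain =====

-- B replaces A's year-by-year loop with an O(1) closed form via the prefix function n//4 - n//100 + n//400.

-- ===== PORT A =====
-- the loop body, identical in both branches of A
def pvBody (db : Int) (i : Int) : Int :=
  if PySem.Int.mod i 4 = 0 ∧ PySem.Int.mod i 100 ≠ 0 then db + 1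
  else if PySem.Int.mod i 400 = 0 then db + 1
  else db

def feladat_10 (a : Int) (b : Int) : Int :=
  if a < b then (PySem.List.pyRange a (b + 1) 1).foldl pvBody 0
  else (PySem.List.pyRange b (a + 1) 1).foldl pvBody 0

-- ===== PORT B =====
def pvF (n : Int) : Int :=
  PySem.Int.floordiv n 4 - PySem.Int.floordiv n 100 + PySem.Int.floordiv n 400

def feladat_10_alt (a : Int) (b : Int) : Int :=
  if a < b then pvF b - pvF (a - 1) else pvF a - pvF (b - 1)

-- ===== PRECONDITION & SPEC =====
def Spec_feladat_10 (a : Int) (b : Int) (out : Int) : Prop := out = feladat_10_alt a b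
instance (a : Int) (b : Int) (out : Int) : Decidable (Spec_feladat_10 a b out) := by unfold Spec_feladat_10; infer_instance

-- ===== CLAIM (what is proved, stated in full; the proofs are below) =====
def Claim_equal_feladat_10 : Prop := ∀ (a : Int) (b : Int), Dom_feladat_10 a b → Spec_feladat_10 a b (feladat_10 a b)

-- ===== LEMMAS AND PROOFS =====

-- one loop step adds exactly the prefix-function increment at i
lemma pvBody_eq (c i : Int) : pvBody c i = c + (pvF i - pvF (i - 1)) := by
  unfold pvBody pvF
  rw [PySem.Int.mod_eq_emod_of_pos (a := i) (b := 4) (by norm_num),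
      PySem.Int.mod_eq_emod_of_pos (a := i) (b := 100) (by norm_num),
      PySem.Int.mod_eq_emod_of_pos (a := i) (b := 400) (by norm_num),
      PySem.Int.floordiv_eq_ediv_of_pos (a := i) (b := 4) (by norm_num),
      PySem.Int.floordiv_eq_ediv_of_pos (a := i) (b := 100) (by norm_num),
      PySem.Int.floordiv_eq_ediv_of_pos (a := i) (b := 400) (by norm_num),
      PySem.Int.floordiv_eq_ediv_of_pos (a := i - 1) (b := 4) (by norm_num),
      PySem.Int.floordiv_eq_ediv_of_pos (a := i - 1) (b := 100) (by norm_num),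
      PySem.Int.floordiv_eq_ediv_of_pos (a := i - 1) (b := 400) (by norm_num)]
  split_ifs with h1 h2 <;> omega

-- the whole loop telescopes to the closed form
lemma pvLoop_eq : ∀ (n : Nat) (lo hi : Int), lo ≤ hi → (hi - lo).toNat = n →
    (PySem.List.pyRange lo (hi + 1) 1).foldl pvBody 0 = pvF hi - pvF (lo - 1) := by
  intro n
  induction n with
  | zero =>
    intro lo hi h1 h2
    have he : hi = lo := by omega
    subst he
    rw [PySem.List.pyRange_one_singleton]
    simp [List.foldl, pvBody_eq]
  | succ k ih =>
    intro lo hi h1 h2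
    have hb : lo ≤ hi - 1 := by omega
    have hih := ih lo (hi - 1) hb (by omega)
    have hsplit : PySem.List.pyRange lo (hi + 1) 1
        = PySem.List.pyRange lo ((hi - 1) + 1) 1 ++ [hi] := by
      rw [show (hi - 1) + 1 = hi by omega]
      exact PySem.List.pyRange_one_succ_right h1
    rw [hsplit, List.foldl_append, hih]
    simp only [List.foldl]
    rw [pvBody_eq]
    omega

-- ===== VERDICT (by name: the statement is the Claim_ definition above) =====
theorem feladat_10_spec : Claim_equal_feladat_10 := by
  intro a b _
  unfold Spec_feladat_10 feladat_10 feladat_10_alt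
  by_cases h : a < b
  · simp only [if_pos h]
    exact pvLoop_eq (b - a).toNat a b (le_of_lt h) rfl
  · simp only [if_neg h]
    exact pvLoop_eq (a - b).toNat b a (by omega) rfl
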